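-- pv_equiv track=rewrite | github.com/Wil-With-One-L/Advent-Of-Code-2023 | Day 5/Day5.py | cleanMaps
-- ===== SOURCE A (Python) =====
-- def cleanMaps(lines):
--   # order[0] = seed-to-soil, order[1] = soil-to-fertilizer, etc.
--   maps = []
--
--   curr_map = []
--   i = 0
--
--   while i < len(lines):
--     line = lines[i]
--     if line == "":
--       maps.append(curr_map)
--       i += 1
--       curr_map = []
--     else:
--       temp = line.split()
--       for j in range(0, len(temp)):
--         temp[j] = int(temp[j])
--       curr_map.append(temp)
--
--     i += 1
--
--   maps.append(curr_map)
--   return maps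
-- ===== SOURCE B (Python) =====
-- def _parseBlock(block):
--     return [[int(x) for x in l.split()] for l in block]
--
-- def cleanMaps(lines):
--     # recursive decomposition: split at the first blank line, drop the blank
--     # and the following header line, recurse on the rest
--     if "" not in lines:
--         return [_parseBlock(lines)]
--     k = lines.index("")
--     return [_parseBlock(lines[:k])] + cleanMaps(lines[k + 2:])
-- ===== Notes on version B (the rewrite author's own statement) =====
-- stated objective: alternative
-- what changed: Replaces A's index-driven while loop with a mutable accumulator by a recursive decomposition that splits at the first blank line, slices off each block (dropping the blank and its following header line) and parses blocks with comprehensions; Pre_ excludes exactly the inputs where A raises ValueError (a non-skipped, non-blank line containing a token int() rejects).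
import Mathlib
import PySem

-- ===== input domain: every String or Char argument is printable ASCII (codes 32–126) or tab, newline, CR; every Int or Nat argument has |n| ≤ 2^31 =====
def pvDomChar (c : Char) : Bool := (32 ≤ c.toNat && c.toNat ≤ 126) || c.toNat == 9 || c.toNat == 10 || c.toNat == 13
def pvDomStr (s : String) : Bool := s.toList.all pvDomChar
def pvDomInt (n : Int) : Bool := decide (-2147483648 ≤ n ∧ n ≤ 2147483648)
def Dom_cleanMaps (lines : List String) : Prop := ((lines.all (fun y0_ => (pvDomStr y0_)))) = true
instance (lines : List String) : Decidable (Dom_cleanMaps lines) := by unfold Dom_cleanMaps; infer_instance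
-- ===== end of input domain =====

-- B re-implements A's blank-separated block parsing by recursive split-at-first-blank with slicing
-- instead of A's index-driven while loop with a mutable accumulator (objective: alternative).

-- ===== PORT A =====
-- line.split(); for j in range(len(temp)): temp[j] = int(temp[j])  (Pre_ guarantees every int() succeeds)
def pvParseLineA (line : String) : List Int :=
  (PySem.Str.split₀ line).map (fun t => (PySem.Int.ofStr? t).getD 0)

-- the while loop: state = (remaining lines, curr_map, maps); a blank line advances i by 2
def cleanMapsLoop (l : List String) (curr : List (List Int)) (maps : List (List (List Int))) :
    List (List (List Int)) :=
  match l with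
  | [] => maps ++ [curr]
  | line :: rest =>
    if line = "" then cleanMapsLoop rest.tail [] (maps ++ [curr])
    else cleanMapsLoop rest (curr ++ [pvParseLineA line]) maps
termination_by l.length
decreasing_by
  · simp [List.length_tail]
  · simp

def cleanMaps (lines : List String) : List (List (List Int)) :=
  cleanMapsLoop lines [] []

-- ===== PORT B =====
-- [[int(x) for x in l.split()] for l in block]
def pvParseBlockB (block : List String) : List (List Int) :=
  block.map (fun l => (PySem.Str.split₀ l).map (fun x => (PySem.Int.ofStr? x).getD 0))

def cleanMaps_alt (lines : List String) : List (List (List Int)) :=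
  match h : PySem.List.index? lines "" with
  | none => [pvParseBlockB lines]
  | some k =>
    pvParseBlockB (PySem.List.slice lines (some 0) (some (k : Int))) ::
      cleanMaps_alt (PySem.List.slice lines (some (((k + 2 : Nat) : Int))) none)
termination_by lines.length
decreasing_by
  rw [PySem.List.slice_from_natCast]
  have hk := PySem.List.index?_isSome_iff (xs := lines) (v := "")
  have : lines ≠ [] := by
    intro hnil; subst hnil; simp [PySem.List.index?_eq_idxOf?] at h
  have : 0 < lines.length := List.length_pos_iff.mpr this
  simp; omega

-- ===== PRECONDITION & SPEC =====
-- Pre_ excludes exactly the inputs on which the Python A raises ValueError: a line that is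
-- non-blank and not skipped (the run of blank lines immediately before it has even length)
-- whose whitespace-split tokens do not all parse as Python ints.
def Pre_cleanMaps (lines : List String) : Prop :=
  ∀ i < lines.length, lines.getD i "" ≠ "" →
    ((lines.take i).reverse.takeWhile (fun l => l = "")).length % 2 = 0 →
    ∀ t ∈ PySem.Str.split₀ (lines.getD i ""), (PySem.Int.ofStr? t).isSome = true
instance (lines : List String) : Decidable (Pre_cleanMaps lines) := by
  unfold Pre_cleanMaps; infer_instance

def pvWitness_cleanMaps : List String := ["1 2", "", "seed-to-soil map:", "3 4"]

def Spec_cleanMaps (lines : List String) (out : List (List (List Int))) : Prop := out = cleanMaps_alt lines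
instance (lines : List String) (out : List (List (List Int))) : Decidable (Spec_cleanMaps lines out) := by unfold Spec_cleanMaps; infer_instance

-- ===== CLAIM (what is proved, stated in full; the proofs are below) =====
def Claim_equal_cleanMaps : Prop := ∀ (lines : List String), Dom_cleanMaps lines → Pre_cleanMaps lines → Spec_cleanMaps lines (cleanMaps lines)

-- ===== LEMMAS AND PROOFS =====

-- tail form of B's recursion (slices rewritten to take/drop, accumulator threaded)
def goAlt (l : List String) (curr : List (List Int)) : List (List (List Int)) :=
  match PySem.List.index? l "" with
  | none => [curr ++ pvParseBlockB l]
  | some k => (curr ++ pvParseBlockB (l.take k)) :: cleanMaps_alt (l.drop (k + 2))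

theorem alt_eq_goAlt (l : List String) : cleanMaps_alt l = goAlt l [] := by
  unfold cleanMaps_alt goAlt
  split
  next h =>
    rw [PySem.List.index?_eq_idxOf?] at h
    simp [h]
  next k h =>
    rw [PySem.List.index?_eq_idxOf?] at h
    simp only [PySem.List.index?_eq_idxOf?, h]
    rw [PySem.List.slice_from_natCast, PySem.List.slice_zero_start,
      PySem.List.slice_to_natCast]
    simp

theorem goAlt_nil (curr : List (List Int)) : goAlt [] curr = [curr] := by
  unfold goAlt
  simp [PySem.List.index?_eq_idxOf?, pvParseBlockB]

theorem goAlt_blank (rest : List String) (curr : List (List Int)) :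
    goAlt ("" :: rest) curr = curr :: cleanMaps_alt rest.tail := by
  unfold goAlt
  rw [PySem.List.index?_cons_self]
  simp [pvParseBlockB]

theorem goAlt_cons (line : String) (rest : List String) (curr : List (List Int))
    (h : line ≠ "") : goAlt (line :: rest) curr = goAlt rest (curr ++ [pvParseLineA line]) := by
  unfold goAlt
  rw [PySem.List.index?_cons_of_ne _ h]
  cases hk : PySem.List.index? rest "" with
  | none => simp [pvParseBlockB, pvParseLineA]
  | some k =>
    simp only [Option.map_some]
    have hd : k + 1 + 2 = (k + 2) + 1 := by omega
    rw [hd]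
    simp [pvParseBlockB, pvParseLineA, List.take_succ_cons, List.drop_succ_cons]

theorem loop_eq_goAlt (l : List String) (curr : List (List Int)) (maps : List (List (List Int))) :
    cleanMapsLoop l curr maps = maps ++ goAlt l curr := by
  match l with
  | [] =>
    unfold cleanMapsLoop
    rw [goAlt_nil]
  | line :: rest =>
    by_cases hb : line = ""
    · subst hb
      unfold cleanMapsLoop
      rw [if_pos rfl, loop_eq_goAlt rest.tail [] (maps ++ [curr]), goAlt_blank,
        alt_eq_goAlt]
      simp
    · unfold cleanMapsLoop
      rw [if_neg hb, loop_eq_goAlt rest (curr ++ [pvParseLineA line]) maps,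
        goAlt_cons line rest curr hb]
termination_by l.length
decreasing_by
  · simp [List.length_tail]
  · simp

-- ===== VERDICT (by name: the statement is the Claim_ definition above) =====
theorem cleanMaps_spec : Claim_equal_cleanMaps := by
  intro lines _ _
  unfold Spec_cleanMaps cleanMaps
  rw [loop_eq_goAlt, alt_eq_goAlt]
  simp
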